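-- pv_equiv track=rewrite | github.com/tufailhamza/Graph-Visualizer | Simple.py | is_valid_degree_sequence_havel_hakimi
-- ===== SOURCE A (Python) =====
-- def is_valid_degree_sequence_havel_hakimi(deg_sequence):
--     step = 0
--     steps_info = []
--
--     while deg_sequence:
--         step += 1
--         steps_info.append(f"Step {step}: Degree sequence: {deg_sequence}")
--
--         if deg_sequence[0] < 0:
--             return False, steps_info
--
--         if deg_sequence[0] == 0:
--             deg_sequence.pop(0)
--         else:
--             k = deg_sequence[0]
--             if len(deg_sequence) < k + 1:
--                 return False, steps_info
--             for i in range(1, k + 1):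
--                 deg_sequence[i] -= 1
--             deg_sequence.pop(0)
--
--         deg_sequence = sorted(deg_sequence, reverse=True)
--
--     return True, steps_info
-- ===== SOURCE B (Python) =====
-- def _merge_desc(xs, ys):
--     out = []
--     i = j = 0
--     while i < len(xs) and j < len(ys):
--         if xs[i] >= ys[j]:
--             out.append(xs[i]); i += 1
--         else:
--             out.append(ys[j]); j += 1
--     out.extend(xs[i:])
--     out.extend(ys[j:])
--     return out
--
--
-- def is_valid_degree_sequence_havel_hakimi(deg_sequence):
--     # Sort once (after the first removal); afterwards keep the sequence sorted
--     # descending with a linear merge instead of re-sorting every step.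
--     step = 0
--     steps_info = []
--     ds = deg_sequence
--     while ds:
--         step += 1
--         steps_info.append(f"Step {step}: Degree sequence: {ds}")
--         k = ds[0]
--         if k < 0:
--             return False, steps_info
--         if k == 0:
--             ds = sorted(ds[1:], reverse=True) if step == 1 else ds[1:]
--         else:
--             if len(ds) < k + 1:
--                 return False, steps_info
--             dec = [x - 1 for x in ds[1:k + 1]]
--             tail = ds[k + 1:]
--             ds = sorted(dec + tail, reverse=True) if step == 1 else _merge_desc(dec, tail)
--     return True, steps_info
-- ===== Notes on version B (the rewrite author's own statement) =====
-- stated objective: alternative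
-- what changed: B sorts the sequence only once (after the first removal) and thereafter maintains the descending order with a two-pointer merge of the decremented prefix and the untouched suffix, instead of A's full re-sort after every step; B also does not mutate its argument.
import Mathlib
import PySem

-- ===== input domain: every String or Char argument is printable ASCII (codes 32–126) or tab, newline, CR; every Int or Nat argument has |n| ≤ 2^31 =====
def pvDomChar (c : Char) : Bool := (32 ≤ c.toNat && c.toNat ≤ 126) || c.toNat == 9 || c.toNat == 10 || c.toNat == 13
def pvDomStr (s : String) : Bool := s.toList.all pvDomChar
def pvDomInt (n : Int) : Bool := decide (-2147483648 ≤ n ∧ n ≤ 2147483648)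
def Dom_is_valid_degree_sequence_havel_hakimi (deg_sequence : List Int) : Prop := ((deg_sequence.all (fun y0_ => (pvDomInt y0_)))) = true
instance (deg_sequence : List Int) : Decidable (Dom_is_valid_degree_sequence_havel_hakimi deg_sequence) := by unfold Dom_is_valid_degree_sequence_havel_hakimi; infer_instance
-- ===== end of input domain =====

-- B sorts once and then maintains the descending order by a two-pointer merge instead of
-- re-sorting every step (objective: alternative). Equivalence is about the RETURN value only:
-- Python A mutates its argument in the first loop iteration, B does not.

-- Python f-string rendering of a list of ints: "[a, b, c]"
def pyListRepr (xs : List Int) : String :=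
  "[" ++ String.intercalate ", " (xs.map PySem.Int.toStr) ++ "]"

def stepLine (step : Int) (xs : List Int) : String :=
  "Step " ++ PySem.Int.toStr step ++ ": Degree sequence: " ++ pyListRepr xs

-- ===== PORT A =====
-- for i in range(1, k+1): deg_sequence[i] -= 1   (on the tail: decrement the first k)
def decFirst (k : Int) : List Int → List Int
  | [] => []
  | x :: xs => if 1 ≤ k then (x - 1) :: decFirst (k - 1) xs else x :: xs

theorem length_decFirst (k : Int) (xs : List Int) : (decFirst k xs).length = xs.length := by
  induction xs generalizing k with
  | nil => rfl
  | cons x xs ih => simp only [decFirst]; split <;> simp [ih]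

def aLoop : List Int → Int → List String → Bool × List String
  | [], _, info => (true, info)
  | d :: rest, step, info =>
    let step' := step + 1
    let info' := info ++ [stepLine step' (d :: rest)]
    if d < 0 then (false, info')
    else if d = 0 then
      aLoop (PySem.List.sorted rest (fun x => x) true) step' info'
    else if ((d :: rest).length : Int) < d + 1 then (false, info')
    else
      aLoop (PySem.List.sorted (decFirst d rest) (fun x => x) true) step' info'
termination_by ds => ds.length
decreasing_by
  · simp [PySem.List.length_sorted]
  · simp [PySem.List.length_sorted, length_decFirst]

def is_valid_degree_sequence_havel_hakimi (deg_sequence : List Int) : Bool × List String :=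
  aLoop deg_sequence 0 []

-- ===== PORT B =====
def mergeDesc : List Int → List Int → List Int
  | [], ys => ys
  | x :: xs, [] => x :: xs
  | x :: xs, y :: ys =>
    if y ≤ x then x :: mergeDesc xs (y :: ys) else y :: mergeDesc (x :: xs) ys
termination_by xs ys => xs.length + ys.length

theorem length_mergeDesc (xs ys : List Int) :
    (mergeDesc xs ys).length = xs.length + ys.length := by
  fun_induction mergeDesc <;> simp_all <;> omega

def bLoop : List Int → Int → List String → Bool × List String
  | [], _, info => (true, info)
  | d :: rest, step, info =>
    let step' := step + 1
    let info' := info ++ [stepLine step' (d :: rest)]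
    if d < 0 then (false, info')
    else if d = 0 then
      bLoop (if step' = 1 then PySem.List.sorted rest (fun x => x) true else rest) step' info'
    else if ((d :: rest).length : Int) < d + 1 then (false, info')
    else
      -- dec = [x - 1 for x in ds[1:k+1]]; tail = ds[k+1:]  (indices in range under the guard)
      let dec := (rest.take d.toNat).map (· - 1)
      let tail := rest.drop d.toNat
      bLoop (if step' = 1 then PySem.List.sorted (dec ++ tail) (fun x => x) true
             else mergeDesc dec tail) step' info'
termination_by ds => ds.length
decreasing_by
  · split <;> simp [PySem.List.length_sorted]
  · split
    · rw [PySem.List.length_sorted]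
      simp only [List.length_append, List.length_map, List.length_take, List.length_drop,
        List.length_cons]
      omega
    · rw [length_mergeDesc]
      simp only [List.length_map, List.length_take, List.length_drop, List.length_cons]
      omega

def is_valid_degree_sequence_havel_hakimi_alt (deg_sequence : List Int) : Bool × List String :=
  bLoop deg_sequence 0 []

-- ===== PRECONDITION & SPEC =====
def Spec_is_valid_degree_sequence_havel_hakimi (deg_sequence : List Int) (out : Bool × List String) : Prop := out = is_valid_degree_sequence_havel_hakimi_alt deg_sequence
instance (deg_sequence : List Int) (out : Bool × List String) : Decidable (Spec_is_valid_degree_sequence_havel_hakimi deg_sequence out) := by unfold Spec_is_valid_degree_sequence_havel_hakimi; infer_instance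

-- ===== CLAIM (what is proved, stated in full; the proofs are below) =====
def Claim_equal_is_valid_degree_sequence_havel_hakimi : Prop := ∀ (deg_sequence : List Int), Dom_is_valid_degree_sequence_havel_hakimi deg_sequence → Spec_is_valid_degree_sequence_havel_hakimi deg_sequence (is_valid_degree_sequence_havel_hakimi deg_sequence)

-- ===== LEMMAS AND PROOFS =====

theorem decFirst_eq_take_drop (k : Int) (xs : List Int) :
    decFirst k xs = (xs.take k.toNat).map (· - 1) ++ xs.drop k.toNat := by
  induction xs generalizing k with
  | nil => simp [decFirst]
  | cons x xs ih =>
    simp only [decFirst]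
    split
    · have hk : k.toNat = (k - 1).toNat + 1 := by omega
      rw [hk]
      simp [ih]
    · have hk : k.toNat = 0 := by omega
      rw [hk]
      simp

theorem mergeDesc_perm (xs ys : List Int) : (mergeDesc xs ys).Perm (xs ++ ys) := by
  fun_induction mergeDesc with
  | case1 => simp
  | case2 => simp
  | case3 x xs y ys h ih => exact ih.cons x
  | case4 x xs y ys h ih =>
    exact (ih.cons y).trans List.perm_middle.symm

theorem mergeDesc_pairwise (xs ys : List Int)
    (hx : xs.Pairwise (· ≥ ·)) (hy : ys.Pairwise (· ≥ ·)) :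
    (mergeDesc xs ys).Pairwise (· ≥ ·) := by
  fun_induction mergeDesc with
  | case1 => exact hy
  | case2 => exact hx
  | case3 x xs y ys h ih =>
    rw [List.pairwise_cons] at hx ⊢
    refine ⟨?_, ih hx.2 hy⟩
    intro a ha
    have := (mergeDesc_perm xs (y :: ys)).mem_iff.mp ha
    rcases List.mem_append.mp this with h1 | h1
    · exact hx.1 a h1
    · rcases List.mem_cons.mp h1 with h1 | h1
      · omega
      · have := (List.pairwise_cons.mp hy).1 a h1; omega
  | case4 x xs y ys h ih =>
    rw [List.pairwise_cons] at hy ⊢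
    refine ⟨?_, ih hx hy.2⟩
    intro a ha
    have := (mergeDesc_perm (x :: xs) ys).mem_iff.mp ha
    rcases List.mem_append.mp this with h1 | h1
    · rcases List.mem_cons.mp h1 with h1 | h1
      · omega
      · have := (List.pairwise_cons.mp hx).1 a h1; omega
    · exact hy.1 a h1

theorem sorted_rev_pairwise_ge (xs : List Int) :
    (PySem.List.sorted xs (fun x => x) true).Pairwise (· ≥ ·) :=
  PySem.List.sorted_pairwise_rev xs (fun x => x)

theorem sorted_rev_eq_of_pairwise (xs ys : List Int) (hp : ys.Perm xs)
    (hs : ys.Pairwise (· ≥ ·)) : PySem.List.sorted xs (fun x => x) true = ys := by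
  refine List.Perm.eq_of_pairwise ?_ (sorted_rev_pairwise_ge xs) hs
    ((PySem.List.sorted_perm xs _ true).trans hp.symm)
  intro a b _ _ h1 h2; omega

theorem loop_eq (n : Nat) (ds : List Int) (step : Int) (info : List String)
    (hn : ds.length ≤ n) (h : step = 0 ∨ ds.Pairwise (· ≥ ·)) :
    aLoop ds step info = bLoop ds step info := by
  induction n generalizing ds step info with
  | zero =>
    have : ds = [] := List.eq_nil_of_length_eq_zero (by omega)
    subst this; rw [aLoop, bLoop]
  | succ n ih =>
    match ds with
    | [] => rw [aLoop, bLoop]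
    | d :: rest =>
      rw [aLoop, bLoop]
      simp only
      split
      · rfl
      · split
        · -- d = 0 branch
          rcases h with h0 | hp
          · have hs1 : step + 1 = 1 := by omega
            rw [if_pos hs1]
            exact ih _ _ _ (by simp [PySem.List.length_sorted] at hn ⊢; omega)
              (Or.inr (sorted_rev_pairwise_ge rest))
          · have hrest : rest.Pairwise (· ≥ ·) := (List.pairwise_cons.mp hp).2
            by_cases hs1 : step + 1 = 1
            · rw [if_pos hs1]
              exact ih _ _ _ (by simp [PySem.List.length_sorted] at hn ⊢; omega)
                (Or.inr (sorted_rev_pairwise_ge rest))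
            · rw [if_neg hs1,
                  sorted_rev_eq_of_pairwise rest rest (List.Perm.refl rest) hrest]
              exact ih _ _ _ (by simp at hn ⊢; omega) (Or.inr hrest)
        · split
          · rfl
          · -- main branch
            have hdec : decFirst d rest = (rest.take d.toNat).map (· - 1) ++ rest.drop d.toNat :=
              decFirst_eq_take_drop d rest
            rcases h with h0 | hp
            · have hs1 : step + 1 = 1 := by omega
              rw [if_pos hs1, hdec]
              refine ih _ _ _ ?_ (Or.inr (sorted_rev_pairwise_ge _))
              simp [PySem.List.length_sorted] at hn ⊢; omega
            · have hrest : rest.Pairwise (· ≥ ·) := (List.pairwise_cons.mp hp).2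
              have hdecp : ((rest.take d.toNat).map (· - 1)).Pairwise (· ≥ ·) := by
                refine List.Pairwise.map _ ?_ (hrest.take)
                intro a b hab; omega
              have htailp : (rest.drop d.toNat).Pairwise (· ≥ ·) := hrest.drop
              have hmp : (mergeDesc ((rest.take d.toNat).map (· - 1)) (rest.drop d.toNat)).Pairwise (· ≥ ·) :=
                mergeDesc_pairwise _ _ hdecp htailp
              have hperm : (mergeDesc ((rest.take d.toNat).map (· - 1)) (rest.drop d.toNat)).Perm
                  (decFirst d rest) := by
                rw [hdec]; exact mergeDesc_perm _ _
              by_cases hs1 : step + 1 = 1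
              · rw [if_pos hs1, hdec]
                refine ih _ _ _ ?_ (Or.inr (sorted_rev_pairwise_ge _))
                simp [PySem.List.length_sorted] at hn ⊢; omega
              · rw [if_neg hs1, sorted_rev_eq_of_pairwise _ _ hperm hmp]
                refine ih _ _ _ ?_ (Or.inr hmp)
                simp [length_mergeDesc] at hn ⊢; omega

-- ===== VERDICT (by name: the statement is the Claim_ definition above) =====
theorem is_valid_degree_sequence_havel_hakimi_spec : Claim_equal_is_valid_degree_sequence_havel_hakimi := by
  intro ds _
  unfold Spec_is_valid_degree_sequence_havel_hakimi
  unfold is_valid_degree_sequence_havel_hakimi is_valid_degree_sequence_havel_hakimi_alt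
  exact loop_eq ds.length ds 0 [] (le_refl _) (Or.inl rfl)
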